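-- pv_equiv track=rewrite | github.com/stuxf/aoc | 2024/Python/07.py | all_valid_two
-- ===== SOURCE A (Python) =====
-- def all_valid_two(arr_nums, res):
--     if len(arr_nums) == 1:
--         return [arr_nums[0]]
--     return [
--         s
--         for num in all_valid_two(arr_nums[1:], res)
--         for s in (
--             arr_nums[0] + num,
--             arr_nums[0] * num,
--             num * 10 ** len(str(arr_nums[0])) + arr_nums[0],
--         )
--         if s <= res
--     ]
-- ===== SOURCE B (Python) =====
-- def all_valid_two(arr_nums, res):
--     # Explicit DFS stack machine instead of recursion: entries (i, v) mean
--     # "value v still has to absorb arr_nums[i-1], ..., arr_nums[0]".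
--     # Children are pushed in reversed order so popping yields the same
--     # left-to-right leaf order as the recursive comprehension.
--     out = []
--     stack = [(len(arr_nums) - 1, arr_nums[-1])]
--     while stack:
--         i, v = stack.pop()
--         if i == 0:
--             out.append(v)
--         else:
--             a = arr_nums[i - 1]
--             for s in (v * 10 ** len(str(a)) + a, a * v, a + v):
--                 if s <= res:
--                     stack.append((i - 1, s))
--     return out
-- ===== Notes on version B (the rewrite author's own statement) =====
-- stated objective: alternative
-- what changed: Replaced the recursion on the list tail by an explicit DFS stack machine over (index, value) entries that emits the same values in the same order without recursion.
import Mathlib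
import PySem

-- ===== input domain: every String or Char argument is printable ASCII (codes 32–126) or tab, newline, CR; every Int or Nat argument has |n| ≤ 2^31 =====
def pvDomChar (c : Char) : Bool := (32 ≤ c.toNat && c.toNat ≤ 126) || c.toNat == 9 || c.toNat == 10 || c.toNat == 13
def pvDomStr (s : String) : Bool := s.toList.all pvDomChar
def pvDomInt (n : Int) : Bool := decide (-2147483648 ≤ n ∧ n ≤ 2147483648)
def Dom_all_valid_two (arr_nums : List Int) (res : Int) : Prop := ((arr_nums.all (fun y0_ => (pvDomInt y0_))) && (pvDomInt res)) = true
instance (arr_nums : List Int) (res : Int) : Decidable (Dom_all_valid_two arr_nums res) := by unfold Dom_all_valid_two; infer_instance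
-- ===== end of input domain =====

-- B replaces A's recursion by an explicit DFS stack machine over (index, value) entries,
-- emitting leaves in the same order; objective: alternative (same values, no recursion).

-- ===== PORT A =====
-- Literal port of A's recursion: len == 1 returns [arr_nums[0]], otherwise recurse on the
-- tail and combine with the head via the comprehension.  On [] Python A recurses forever
-- (RecursionError); Pre_ excludes it, the port returns [] there.
-- '10 ** len(str(a))' is ported as 10 ^ (PySem.Int.toChars a).length (exact).
def all_valid_two (arr_nums : List Int) (res : Int) : List Int :=
  match arr_nums with
  | [] => []
  | [x] => [x]
  | x :: y :: t =>
      (all_valid_two (y :: t) res).flatMap (fun num =>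
        [x + num, x * num,
         num * (10 : Int) ^ (PySem.Int.toChars x).length + x].filter
          (fun s => decide (s ≤ res)))

-- ===== PORT B =====
-- The three candidates produced by combining a with v, already filtered by '<= res'
-- (this is the forward order; Source B pushes them reversed onto the stack, so popping
-- visits them in this forward order).
def pvCands (a v res : Int) : List Int :=
  [a + v, a * v, v * (10 : Int) ^ (PySem.Int.toChars a).length + a].filter
    (fun s => decide (s ≤ res))

-- Termination measure for the stack loop: each entry (i, v) weighs 4^i; a pop replaces
-- weight 4^(i+1) by at most 3 * 4^i.
def pvMeasure (st : List (Nat × Int)) : Nat := (st.map (fun p => 4 ^ p.1)).sum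

theorem pvCands_len_le (a v res : Int) : (pvCands a v res).length ≤ 3 := by
  simpa [pvCands] using (List.length_filter_le _ _)

theorem pvMeasure_map (cs : List Int) (i : Nat) :
    pvMeasure (cs.map (fun s => (i, s))) = cs.length * 4 ^ i := by
  induction cs with
  | nil => simp [pvMeasure]
  | cons c cs ih =>
      simp only [pvMeasure, List.map_cons, List.map_map, List.sum_cons,
        List.length_cons] at ih ⊢
      rw [Nat.succ_mul]; omega

-- Source B's while loop: pop (i, v); if i = 0 emit v, else push the (reversed) filtered
-- candidates built from arr[i-1].  Head of the list is the top of the stack, so the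
-- reversed pushes become a forward-order prepend.  arr.getD (i-1) 0 is Python's
-- arr_nums[i-1]: the index is always in range for reachable stack entries (0 ≤ i-1 < len).
def pvStackRun (arr : List Int) (res : Int) (st : List (Nat × Int)) : List Int :=
  match st with
  | [] => []
  | (0, v) :: rest => v :: pvStackRun arr res rest
  | (i + 1, v) :: rest =>
      pvStackRun arr res (((pvCands (arr.getD i 0) v res).map (fun s => (i, s))) ++ rest)
termination_by pvMeasure st
decreasing_by
  · simp [pvMeasure]
  · have h := pvCands_len_le (arr.getD i 0) v res
    have h2 := pvMeasure_map (pvCands (arr.getD i 0) v res) i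
    have happ : pvMeasure (((pvCands (arr.getD i 0) v res).map (fun s => (i, s))) ++ rest) =
        pvMeasure ((pvCands (arr.getD i 0) v res).map (fun s => (i, s))) + pvMeasure rest := by
      simp [pvMeasure]
    have hc : pvMeasure ((i + 1, v) :: rest) = 4 ^ (i + 1) + pvMeasure rest := by
      simp [pvMeasure]
    have h4 : (1:Nat) ≤ 4 ^ i := Nat.one_le_pow _ _ (by omega)
    have h5 : (pvCands (arr.getD i 0) v res).length * 4 ^ i ≤ 3 * 4 ^ i :=
      Nat.mul_le_mul_right _ h
    rw [happ, hc, h2]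
    omega

-- Literal port of Source B: start from the stack [(len-1, arr_nums[-1])] and run the loop.
-- On [] Source B raises IndexError (arr_nums[-1]); Pre_ excludes it, the port returns [].
def all_valid_two_alt (arr_nums : List Int) (res : Int) : List Int :=
  match PySem.List.pyGet? arr_nums (-1) with
  | none => []
  | some last => pvStackRun arr_nums res [(arr_nums.length - 1, last)]

-- ===== PRECONDITION & SPEC =====
-- Pre_ excludes only the empty list, on which A raises RecursionError (infinite recursion)
-- and B raises IndexError.
def Pre_all_valid_two (arr_nums : List Int) (res : Int) : Prop := arr_nums ≠ []
instance (arr_nums : List Int) (res : Int) : Decidable (Pre_all_valid_two arr_nums res) := by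
  unfold Pre_all_valid_two; infer_instance
def pvWitness_all_valid_two : List Int × Int := ([3, 5, 2], 100)

def Spec_all_valid_two (arr_nums : List Int) (res : Int) (out : List Int) : Prop := out = all_valid_two_alt arr_nums res
instance (arr_nums : List Int) (res : Int) (out : List Int) : Decidable (Spec_all_valid_two arr_nums res out) := by unfold Spec_all_valid_two; infer_instance

-- ===== CLAIM =====
def Claim_equal_all_valid_two : Prop := ∀ (arr_nums : List Int) (res : Int), Dom_all_valid_two arr_nums res → Pre_all_valid_two arr_nums res → Spec_all_valid_two arr_nums res (all_valid_two arr_nums res)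

-- ===== LEMMAS AND PROOFS =====

-- The value produced by running the stack machine from a single entry (i, v):
-- a pure recursive description used only in the proofs.
def pvRun1 (arr : List Int) (res : Int) : Nat → Int → List Int
  | 0, v => [v]
  | i + 1, v => (pvCands (arr.getD i 0) v res).flatMap (pvRun1 arr res i)

theorem pvStackRun_eq_flatMap (arr : List Int) (res : Int) :
    ∀ st, pvStackRun arr res st = st.flatMap (fun p => pvRun1 arr res p.1 p.2) := by
  intro st
  induction st using pvStackRun.induct arr res with
  | case1 => simp [pvStackRun]
  | case2 v rest ih => simp [pvStackRun, ih, pvRun1]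
  | case3 i v rest ih =>
      rw [pvStackRun, ih]
      simp [pvRun1, List.flatMap_append, List.flatMap_map]

-- Index shift: prepending x to the array post-composes every run with the x-combining step.
theorem pvRun1_cons (x : Int) (rest : List Int) (res : Int) :
    ∀ i v, pvRun1 (x :: rest) res (i + 1) v =
      (pvRun1 rest res i v).flatMap (fun num => pvCands x num res) := by
  intro i
  induction i with
  | zero => intro v; simp [pvRun1]
  | succ i ih =>
      intro v
      show (pvCands ((x :: rest).getD (i + 1) 0) v res).flatMap (pvRun1 (x :: rest) res (i + 1)) = _
      have : (x :: rest).getD (i + 1) 0 = rest.getD i 0 := rfl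
      rw [this]
      calc (pvCands (rest.getD i 0) v res).flatMap (pvRun1 (x :: rest) res (i + 1))
          = (pvCands (rest.getD i 0) v res).flatMap
              (fun s => (pvRun1 rest res i s).flatMap (fun num => pvCands x num res)) := by
            simp only [funext ih]
        _ = ((pvCands (rest.getD i 0) v res).flatMap (pvRun1 rest res i)).flatMap
              (fun num => pvCands x num res) := by
            rw [List.flatMap_assoc]
        _ = _ := rfl

theorem pvA_run (res : Int) : ∀ xs : List Int, xs ≠ [] →
    all_valid_two xs res = pvRun1 xs res (xs.length - 1) (xs.getLastD 0)
  | [x], _ => by simp [all_valid_two, pvRun1]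
  | x :: y :: t, _ => by
      have ih := pvA_run res (y :: t) (by simp)
      have hA : all_valid_two (x :: y :: t) res =
          (all_valid_two (y :: t) res).flatMap (fun num => pvCands x num res) := rfl
      have hlen : (x :: y :: t).length - 1 = ((y :: t).length - 1) + 1 := by
        simp
      have hlast : (x :: y :: t).getLastD 0 = (y :: t).getLastD 0 := by
        simp
      rw [hA, ih, hlen, hlast, pvRun1_cons]

-- ===== VERDICT =====
theorem all_valid_two_spec : Claim_equal_all_valid_two := by
  intro arr_nums res _ hpre
  unfold Spec_all_valid_two
  have hlast : PySem.List.pyGet? arr_nums (-1) = some (arr_nums.getLastD 0) := by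
    rw [PySem.List.pyGet?_neg_one]
    cases arr_nums with
    | nil => exact absurd rfl hpre
    | cons a t =>
        cases h : (a :: t).getLast? with
        | none => simp [List.getLast?_eq_none_iff] at h
        | some b => simp [List.getLastD_eq_getLast?, h]
  rw [pvA_run res arr_nums hpre]
  unfold all_valid_two_alt
  rw [hlast]
  simp [pvStackRun_eq_flatMap]
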